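-- pv_equiv track=rewrite | github.com/hnpl/miscs | 289A-Quantum-Computation-Theory/CCZ.py | hash_Pauli3
-- ===== SOURCE A (Python) =====
-- def hash_Pauli3(p):
--     hash = 0
--     k = 0
--     for row in p:
--         for element in row:
--             hash += (2 ** k) * element
--             k += 1
--     return hash
-- ===== SOURCE B (Python) =====
-- def hash_Pauli3(p):
--     h = 0
--     for row in reversed(p):
--         for element in reversed(row):
--             h = h * 2 + element
--     return h
-- ===== Notes on version B (the rewrite author's own statement) =====
-- stated objective: faster
-- what changed: Replaces the power-weighted sum (maintaining a bit-position counter k and recomputing 2**k for every element) with Horner's method over the matrix flattened in reverse order: a single running accumulator doubled at each step, no powers and no counter.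
import Mathlib
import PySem

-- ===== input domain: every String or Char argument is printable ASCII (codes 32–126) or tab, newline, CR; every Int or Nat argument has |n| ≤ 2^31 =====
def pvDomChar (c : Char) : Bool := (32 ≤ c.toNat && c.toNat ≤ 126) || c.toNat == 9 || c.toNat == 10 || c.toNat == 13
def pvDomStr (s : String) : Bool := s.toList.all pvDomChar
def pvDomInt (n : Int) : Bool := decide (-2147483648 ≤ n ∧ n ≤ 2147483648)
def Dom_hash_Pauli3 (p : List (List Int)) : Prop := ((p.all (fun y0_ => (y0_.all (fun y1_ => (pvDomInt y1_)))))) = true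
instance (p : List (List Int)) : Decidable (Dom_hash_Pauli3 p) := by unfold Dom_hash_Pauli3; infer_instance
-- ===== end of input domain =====

-- ===== PORT A =====
-- literal port of A: running hash plus bit-position counter k, adding 2^k * element
def hash_Pauli3 (p : List (List Int)) : Int :=
  (p.foldl (fun (s : Int × Nat) row =>
    row.foldl (fun (s : Int × Nat) element => (s.1 + 2 ^ s.2 * element, s.2 + 1)) s) (0, 0)).1

-- ===== PORT B =====
-- B: Horner's method over the matrix flattened in reverse order (one accumulator, no powers)
def hash_Pauli3_alt (p : List (List Int)) : Int :=
  p.reverse.foldl (fun h row => row.reverse.foldl (fun h element => h * 2 + element) h) 0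

-- ===== PRECONDITION & SPEC =====
def Spec_hash_Pauli3 (p : List (List Int)) (out : Int) : Prop := out = hash_Pauli3_alt p
instance (p : List (List Int)) (out : Int) : Decidable (Spec_hash_Pauli3 p out) := by unfold Spec_hash_Pauli3; infer_instance

-- ===== CLAIM (what is proved, stated in full; the proofs are below) =====
def Claim_equal_hash_Pauli3 : Prop := ∀ (p : List (List Int)), Dom_hash_Pauli3 p → Spec_hash_Pauli3 p (hash_Pauli3 p)

-- ===== LEMMAS AND PROOFS =====

-- the common reference value: Horner evaluation of the flattened matrix (as a foldr)
def pvHorner (l : List Int) : Int := l.foldr (fun e h => h * 2 + e) 0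

-- A's inner loop over one flat list, from state (h, k), yields h + 2^k * Horner
theorem pvA_flat (l : List Int) : ∀ (h : Int) (k : Nat),
    (l.foldl (fun (s : Int × Nat) element => (s.1 + 2 ^ s.2 * element, s.2 + 1)) (h, k)).1
      = h + 2 ^ k * pvHorner l := by
  induction l with
  | nil => intro h k; simp [pvHorner]
  | cons e t ih =>
    intro h k
    simp only [List.foldl_cons, pvHorner, List.foldr_cons, ih (h + 2 ^ k * e) (k + 1)]
    have : (2 : Int) ^ (k + 1) = 2 ^ k * 2 := by ring
    simp only [pvHorner] at *
    push_cast [this]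
    ring

-- A's nested loop equals the flat loop over p.flatten (same fold, same state)
theorem pvA_flatten (p : List (List Int)) :
    hash_Pauli3 p
      = ((p.flatten).foldl (fun (s : Int × Nat) element => (s.1 + 2 ^ s.2 * element, s.2 + 1)) (0, 0)).1 := by
  simp [hash_Pauli3, List.foldl_flatten]

-- B equals Horner of the flattened matrix
theorem pvB_flatten (p : List (List Int)) : hash_Pauli3_alt p = pvHorner p.flatten := by
  have step : ∀ (rows : List (List Int)) (h : Int),
      rows.foldl (fun h row => row.reverse.foldl (fun h e => h * 2 + e) h) h
        = (rows.map List.reverse).flatten.foldl (fun h e => h * 2 + e) h := by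
    intro rows
    induction rows with
    | nil => intro h; rfl
    | cons r t ih =>
      intro h
      simp only [List.map_cons, List.flatten_cons, List.foldl_append, List.foldl_cons]
      exact ih _
  have hrev : ((p.reverse.map List.reverse).flatten) = (p.flatten).reverse := by
    rw [List.reverse_flatten, List.map_reverse]
  unfold hash_Pauli3_alt
  rw [step, hrev, List.foldl_reverse]
  rfl

-- ===== VERDICT (by name: the statement is the Claim_ definition above) =====
theorem hash_Pauli3_spec : Claim_equal_hash_Pauli3 := by
  intro p _
  unfold Spec_hash_Pauli3
  rw [pvA_flatten, pvA_flat, pvB_flatten]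
  simp
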